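-- pv_equiv track=rewrite | github.com/SDM-TIB/Trav-SHACL | TravSHACL/app/__init__.py | travshacl_to_html_table
-- ===== SOURCE A (Python) =====
-- def travshacl_to_html_table(trav_result, time_used):
--     parsed_result = []
--
--     for shape, validation_dict in trav_result.items():
--         for validation_result, instances in validation_dict.items():
--             for instance in instances:
--                 finished_at = shape
--                 if finished_at[0] == '<':
--                     finished_at = finished_at[1:]
--                 if finished_at[-1] == '>':
--                     finished_at = finished_at[:-1]
--
--                 shape_ = instance[0]
--                 if shape_[0] == '<':
--                     shape_ = shape_[1:]
--                 if shape_[-1] == '>':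
--                     shape_ = shape_[:-1]
--                 parsed_result.append({'shape': shape_, 'finished@shape': finished_at, 'validation result': validation_result.replace('_instances',''), 'instance': instance[1]})
--
--     html = '<div>Trav-SHACL returned ' + str(len(parsed_result)) + ' validation results in ' + str(time_used) + ' seconds.<br><br><table border="0px" style="border-spacing: 10px; margin-left: auto; margin-right: auto;">'
--
--     order = []
--     html += '<tr>'
--     for item in ['instance', 'shape', 'validation result', 'finished@shape']:
--         order.append(item)
--         html += '<th>' + item + '</th>'
--     html += '</tr>'
--
--     for res in parsed_result:
--         html += '<tr>'
--         for item in order: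
--             if res[item]:
--                 if item == 'validation result':
--                     if res[item] == 'valid':
--                         html += '<td style="color: green">' + str(res[item]) + '</td>'
--                     else:
--                         html += '<td style="color: red">' + str(res[item]) + '</td>'
--                 else:
--                     html += '<td>' + str(res[item]) + '</td>'
--         html += '</tr>'
--
--     html += '</table></div>'
--     return html
-- ===== SOURCE B (Python) =====
-- def travshacl_to_html_table(trav_result, time_used):
--     # Fused single pass: emit each row's cells directly, collect row strings, join once.
--     def trim(s):
--         if s.startswith('<'):
--             s = s[1:]
--         if s.endswith('>'):
--             s = s[:-1]
--         return s
--
--     rows = []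
--     for shape, validation_dict in trav_result.items():
--         finished_at = trim(shape)
--         for validation_result, instances in validation_dict.items():
--             vr = validation_result.replace('_instances', '')
--             if vr:
--                 if vr == 'valid':
--                     vr_cell = '<td style="color: green">' + vr + '</td>'
--                 else:
--                     vr_cell = '<td style="color: red">' + vr + '</td>'
--             else:
--                 vr_cell = ''
--             for instance in instances:
--                 cells = []
--                 if instance[1]:
--                     cells.append('<td>' + instance[1] + '</td>')
--                 shape_ = trim(instance[0])
--                 if shape_:
--                     cells.append('<td>' + shape_ + '</td>')
--                 cells.append(vr_cell)
--                 if finished_at: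
--                     cells.append('<td>' + finished_at + '</td>')
--                 rows.append('<tr>' + ''.join(cells) + '</tr>')
--
--     header = ''.join('<th>' + h + '</th>' for h in ('instance', 'shape', 'validation result', 'finished@shape'))
--     return ('<div>Trav-SHACL returned ' + str(len(rows)) + ' validation results in ' + str(time_used)
--             + ' seconds.<br><br><table border="0px" style="border-spacing: 10px; margin-left: auto; margin-right: auto;">'
--             + '<tr>' + header + '</tr>' + ''.join(rows) + '</table></div>')
-- ===== Notes on version B (the rewrite author's own statement) =====
-- stated objective: simpler
-- what changed: A first materialises a list of per-row dicts and then renders it with a second loop that looks each field up by key in a fixed order; B fuses the two phases into one pass over the nested dicts that emits each row's <td> cells directly (computing per-shape/per-result strings once) and collects row strings whose count supplies the header.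
import Mathlib
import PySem

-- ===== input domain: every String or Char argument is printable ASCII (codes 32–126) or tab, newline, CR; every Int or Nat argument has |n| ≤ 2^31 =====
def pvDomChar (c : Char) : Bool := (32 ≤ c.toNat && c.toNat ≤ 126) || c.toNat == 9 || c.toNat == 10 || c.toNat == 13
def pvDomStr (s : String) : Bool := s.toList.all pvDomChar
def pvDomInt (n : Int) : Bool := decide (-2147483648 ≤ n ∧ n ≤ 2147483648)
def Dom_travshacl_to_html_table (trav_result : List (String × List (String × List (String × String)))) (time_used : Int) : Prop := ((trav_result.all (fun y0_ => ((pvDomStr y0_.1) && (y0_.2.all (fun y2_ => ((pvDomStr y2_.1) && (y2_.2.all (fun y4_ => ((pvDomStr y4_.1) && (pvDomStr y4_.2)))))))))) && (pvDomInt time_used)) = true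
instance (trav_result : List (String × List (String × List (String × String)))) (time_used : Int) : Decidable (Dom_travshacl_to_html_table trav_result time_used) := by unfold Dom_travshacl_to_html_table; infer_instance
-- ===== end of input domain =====

-- B fuses A's two phases (build a list of row dicts, then render it with a key-ordered lookup loop)
-- into one pass that emits each row's <td> cells directly; same return value (objective: simpler decomposition).


-- ===== PORT A =====
def travshacl_to_html_table (trav_result : List (String × List (String × List (String × String)))) (time_used : Int) : String :=
  -- parsed_result: three nested for-loops appending one row dict per instance
  let parsed : List (PySem.Dict String String) :=
    trav_result.foldl (fun acc p =>
      p.2.foldl (fun acc2 q =>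
        q.2.foldl (fun acc3 inst =>
          let fin1 := if PySem.Str.pyGet? p.1 0 = some '<' then PySem.Str.slice p.1 (some 1) none else p.1
          let fin2 := if PySem.Str.pyGet? fin1 (-1) = some '>' then PySem.Str.slice fin1 none (some (-1)) else fin1
          let sh1 := if PySem.Str.pyGet? inst.1 0 = some '<' then PySem.Str.slice inst.1 (some 1) none else inst.1
          let sh2 := if PySem.Str.pyGet? sh1 (-1) = some '>' then PySem.Str.slice sh1 none (some (-1)) else sh1
          acc3 ++ [((((PySem.Dict.empty : PySem.Dict String String).insert "shape" sh2).insert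
                      "finished@shape" fin2).insert
                      "validation result" (PySem.Str.replace q.1 "_instances" "")).insert
                      "instance" inst.2])
          acc2) acc) []
  let html0 := "<div>Trav-SHACL returned " ++ PySem.Int.toStr (parsed.length : Int) ++ " validation results in "
               ++ PySem.Int.toStr time_used
               ++ " seconds.<br><br><table border=\"0px\" style=\"border-spacing: 10px; margin-left: auto; margin-right: auto;\">"
  -- header loop (also builds `order`)
  let st := (["instance", "shape", "validation result", "finished@shape"]).foldl
      (fun (st : List String × String) item => (st.1 ++ [item], st.2 ++ "<th>" ++ item ++ "</th>"))
      (([] : List String), html0 ++ "<tr>")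
  let order := st.1
  let html2 := st.2 ++ "</tr>"
  -- row-rendering loop: for each res, for each item in order, conditional <td>
  let html3 := parsed.foldl (fun h res =>
      (order.foldl (fun h2 item =>
        let v := (PySem.Dict.get? res item).getD ""
        if v ≠ "" then
          if item = "validation result" then
            if v = "valid" then h2 ++ "<td style=\"color: green\">" ++ v ++ "</td>"
            else h2 ++ "<td style=\"color: red\">" ++ v ++ "</td>"
          else h2 ++ "<td>" ++ v ++ "</td>"
        else h2) (h ++ "<tr>")) ++ "</tr>") html2
  html3 ++ "</table></div>"

-- ===== PORT B =====
def pvTrimB (s : String) : String :=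
  let s1 := if PySem.Str.startswith s "<" then PySem.Str.slice s (some 1) none else s
  if PySem.Str.endswith s1 ">" then PySem.Str.slice s1 none (some (-1)) else s1

def travshacl_to_html_table_alt (trav_result : List (String × List (String × List (String × String)))) (time_used : Int) : String :=
  let rows : List String :=
    trav_result.foldl (fun rows p =>
      let fin := pvTrimB p.1
      p.2.foldl (fun rows2 q =>
        let vr := PySem.Str.replace q.1 "_instances" ""
        let vrCell := if vr ≠ "" then
            (if vr = "valid" then "<td style=\"color: green\">" ++ vr ++ "</td>"
             else "<td style=\"color: red\">" ++ vr ++ "</td>")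
          else ""
        q.2.foldl (fun rows3 inst =>
          let cells := (if inst.2 ≠ "" then ["<td>" ++ inst.2 ++ "</td>"] else [])
          let sh := pvTrimB inst.1
          let cells := cells ++ (if sh ≠ "" then ["<td>" ++ sh ++ "</td>"] else [])
          let cells := cells ++ [vrCell]
          let cells := cells ++ (if fin ≠ "" then ["<td>" ++ fin ++ "</td>"] else [])
          rows3 ++ ["<tr>" ++ PySem.Str.join "" cells ++ "</tr>"]) rows2) rows) []
  let header := PySem.Str.join "" ((["instance", "shape", "validation result", "finished@shape"]).map
      (fun h => "<th>" ++ h ++ "</th>"))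
  "<div>Trav-SHACL returned " ++ PySem.Int.toStr (rows.length : Int) ++ " validation results in "
    ++ PySem.Int.toStr time_used
    ++ " seconds.<br><br><table border=\"0px\" style=\"border-spacing: 10px; margin-left: auto; margin-right: auto;\">"
    ++ "<tr>" ++ header ++ "</tr>" ++ PySem.Str.join "" rows ++ "</table></div>"

-- ===== PRECONDITION & SPEC =====
-- Pre_ excludes exactly the inputs where Python A raises IndexError (a shape key or an instance
-- IRI equal to "" or "<", reached by some instance), and requires distinct keys at both dict
-- levels (a Python dict cannot carry duplicate keys, so A never receives such an input).
def Pre_travshacl_to_html_table (trav_result : List (String × List (String × List (String × String)))) (time_used : Int) : Prop :=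
  (trav_result.map Prod.fst).Nodup ∧
  (∀ p ∈ trav_result, ((p.2).map Prod.fst).Nodup) ∧
  (∀ p ∈ trav_result, ∀ q ∈ p.2, ∀ inst ∈ q.2,
    p.1 ≠ "" ∧ p.1 ≠ "<" ∧ inst.1 ≠ "" ∧ inst.1 ≠ "<")
instance (trav_result : List (String × List (String × List (String × String)))) (time_used : Int) : Decidable (Pre_travshacl_to_html_table trav_result time_used) := by unfold Pre_travshacl_to_html_table; infer_instance

def pvWitness_travshacl_to_html_table : (List (String × List (String × List (String × String)))) × Int :=
  ([("<S1>", [("valid_instances", [("<A>", "i1")]), ("invalid_instances", [("B", "")])])], 5)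

def Spec_travshacl_to_html_table (trav_result : List (String × List (String × List (String × String)))) (time_used : Int) (out : String) : Prop := out = travshacl_to_html_table_alt trav_result time_used
instance (trav_result : List (String × List (String × List (String × String)))) (time_used : Int) (out : String) : Decidable (Spec_travshacl_to_html_table trav_result time_used out) := by unfold Spec_travshacl_to_html_table; infer_instance

-- ===== CLAIM (what is proved, stated in full; the proofs are below) =====
def Claim_equal_travshacl_to_html_table : Prop := ∀ (trav_result : List (String × List (String × List (String × String)))) (time_used : Int), Dom_travshacl_to_html_table trav_result time_used → Pre_travshacl_to_html_table trav_result time_used → Spec_travshacl_to_html_table trav_result time_used (travshacl_to_html_table trav_result time_used)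

-- ===== LEMMAS AND PROOFS =====

-- the row dict A builds for (shape, validation_result, instance)
def pvDictRow (s v : String) (inst : String × String) : PySem.Dict String String :=
  let fin1 := if PySem.Str.pyGet? s 0 = some '<' then PySem.Str.slice s (some 1) none else s
  let fin2 := if PySem.Str.pyGet? fin1 (-1) = some '>' then PySem.Str.slice fin1 none (some (-1)) else fin1
  let sh1 := if PySem.Str.pyGet? inst.1 0 = some '<' then PySem.Str.slice inst.1 (some 1) none else inst.1
  let sh2 := if PySem.Str.pyGet? sh1 (-1) = some '>' then PySem.Str.slice sh1 none (some (-1)) else sh1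
  ((((PySem.Dict.empty : PySem.Dict String String).insert "shape" sh2).insert
      "finished@shape" fin2).insert
      "validation result" (PySem.Str.replace v "_instances" "")).insert
      "instance" inst.2

-- the string A's row-rendering loop adds for one row dict
def pvContrib (res : PySem.Dict String String) : String :=
  (["instance", "shape", "validation result", "finished@shape"].foldl (fun h2 item =>
    let v := (PySem.Dict.get? res item).getD ""
    if v ≠ "" then
      if item = "validation result" then
        if v = "valid" then h2 ++ "<td style=\"color: green\">" ++ v ++ "</td>"
        else h2 ++ "<td style=\"color: red\">" ++ v ++ "</td>"
      else h2 ++ "<td>" ++ v ++ "</td>"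
    else h2) "<tr>") ++ "</tr>"

-- the row string B builds for (shape, validation_result, instance)
def pvRowStrB (s v : String) (inst : String × String) : String :=
  let fin := pvTrimB s
  let vr := PySem.Str.replace v "_instances" ""
  let vrCell := if vr ≠ "" then
      (if vr = "valid" then "<td style=\"color: green\">" ++ vr ++ "</td>"
       else "<td style=\"color: red\">" ++ vr ++ "</td>")
    else ""
  let cells := (if inst.2 ≠ "" then ["<td>" ++ inst.2 ++ "</td>"] else [])
  let sh := pvTrimB inst.1
  let cells := cells ++ (if sh ≠ "" then ["<td>" ++ sh ++ "</td>"] else [])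
  let cells := cells ++ [vrCell]
  let cells := cells ++ (if fin ≠ "" then ["<td>" ++ fin ++ "</td>"] else [])
  "<tr>" ++ PySem.Str.join "" cells ++ "</tr>"

lemma pvJoin_nil : PySem.Str.join "" [] = "" := rfl

lemma pvJoin_cons (x : String) (l : List String) :
    PySem.Str.join "" (x :: l) = x ++ PySem.Str.join "" l := by
  cases l with
  | nil => simp [PySem.Str.join, PySem.Chars.join, List.intercalate]
  | cons b t =>
    simp [PySem.Str.join, PySem.Chars.join, List.intercalate, List.intersperse_cons₂,
      String.ofList_append]

lemma pvStartswith_iff (s : String) : PySem.Str.startswith s "<" = true ↔ PySem.Str.pyGet? s 0 = some '<' := by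
  cases h : s.toList with
  | nil => simp [PySem.Str.startswith, PySem.Chars.startswith, PySem.Str.pyGet?, PySem.Chars.pyGet?, PySem.List.pyGet?, h]
  | cons c t =>
    simp [PySem.Str.startswith, PySem.Chars.startswith, PySem.Str.pyGet?, PySem.Chars.pyGet?,
      PySem.List.pyGet?, PySem.List.pyIdx?, h, List.isPrefixOf]
    exact eq_comm

lemma pvEndswith_iff (s : String) : PySem.Str.endswith s ">" = true ↔ PySem.Str.pyGet? s (-1) = some '>' := by
  cases h : s.toList using List.reverseRecOn with
  | nil => simp [PySem.Str.endswith, PySem.Chars.endswith, PySem.Str.pyGet?, PySem.Chars.pyGet?, PySem.List.pyGet?, h]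
  | append_singleton t c =>
    simp [PySem.Str.endswith, PySem.Chars.endswith, PySem.Str.pyGet?, PySem.Chars.pyGet?, h,
      List.isSuffixOf, PySem.List.pyGet?_neg_one_append_singleton]
    exact eq_comm

lemma pvTrim_eq (s : String) :
    (let s1 := if PySem.Str.pyGet? s 0 = some '<' then PySem.Str.slice s (some 1) none else s
     if PySem.Str.pyGet? s1 (-1) = some '>' then PySem.Str.slice s1 none (some (-1)) else s1) = pvTrimB s := by
  simp only [pvTrimB, pvStartswith_iff, pvEndswith_iff]

lemma pvRow_eq (s v : String) (inst : String × String) :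
    pvContrib (pvDictRow s v inst) = pvRowStrB s v inst := by
  simp only [pvDictRow, pvContrib, pvRowStrB, List.foldl,
    PySem.Dict.get?_insert_self,
    PySem.Dict.get?_insert_of_ne _ _ (by decide : ("shape":String) ≠ "instance"),
    PySem.Dict.get?_insert_of_ne _ _ (by decide : ("shape":String) ≠ "validation result"),
    PySem.Dict.get?_insert_of_ne _ _ (by decide : ("shape":String) ≠ "finished@shape"),
    PySem.Dict.get?_insert_of_ne _ _ (by decide : ("validation result":String) ≠ "instance"),
    PySem.Dict.get?_insert_of_ne _ _ (by decide : ("finished@shape":String) ≠ "instance"),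
    PySem.Dict.get?_insert_of_ne _ _ (by decide : ("finished@shape":String) ≠ "validation result"),
    pvTrim_eq, Option.getD_some]
  simp only [ne_eq, reduceIte, String.reduceEq]
  split_ifs <;> simp_all [pvJoin_cons, pvJoin_nil, String.append_empty, ← String.append_assoc] <;>
    simp [String.append_assoc]

lemma pvA_inner (s v : String) (insts : List (String × String)) (acc : List (PySem.Dict String String)) :
    insts.foldl (fun acc3 inst =>
      let fin1 := if PySem.Str.pyGet? s 0 = some '<' then PySem.Str.slice s (some 1) none else s
      let fin2 := if PySem.Str.pyGet? fin1 (-1) = some '>' then PySem.Str.slice fin1 none (some (-1)) else fin1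
      let sh1 := if PySem.Str.pyGet? inst.1 0 = some '<' then PySem.Str.slice inst.1 (some 1) none else inst.1
      let sh2 := if PySem.Str.pyGet? sh1 (-1) = some '>' then PySem.Str.slice sh1 none (some (-1)) else sh1
      acc3 ++ [((((PySem.Dict.empty : PySem.Dict String String).insert "shape" sh2).insert
                  "finished@shape" fin2).insert
                  "validation result" (PySem.Str.replace v "_instances" "")).insert
                  "instance" inst.2]) acc
    = acc ++ insts.map (pvDictRow s v) := by
  induction insts generalizing acc with
  | nil => simp
  | cons i t ih =>
    rw [List.foldl_cons, ih, List.append_assoc]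
    rfl

lemma pvA_mid (s : String) (vd : List (String × List (String × String))) (acc : List (PySem.Dict String String)) :
    vd.foldl (fun acc2 q =>
      q.2.foldl (fun acc3 inst =>
        let fin1 := if PySem.Str.pyGet? s 0 = some '<' then PySem.Str.slice s (some 1) none else s
        let fin2 := if PySem.Str.pyGet? fin1 (-1) = some '>' then PySem.Str.slice fin1 none (some (-1)) else fin1
        let sh1 := if PySem.Str.pyGet? inst.1 0 = some '<' then PySem.Str.slice inst.1 (some 1) none else inst.1
        let sh2 := if PySem.Str.pyGet? sh1 (-1) = some '>' then PySem.Str.slice sh1 none (some (-1)) else sh1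
        acc3 ++ [((((PySem.Dict.empty : PySem.Dict String String).insert "shape" sh2).insert
                    "finished@shape" fin2).insert
                    "validation result" (PySem.Str.replace q.1 "_instances" "")).insert
                    "instance" inst.2]) acc2) acc
    = acc ++ vd.flatMap (fun q => q.2.map (pvDictRow s q.1)) := by
  induction vd generalizing acc with
  | nil => simp
  | cons q t ih =>
    rw [List.foldl_cons]
    show List.foldl _ (List.foldl _ acc q.2) t = _
    rw [pvA_inner, ih, List.append_assoc, List.flatMap_cons]

lemma pvA_parsed (tr : List (String × List (String × List (String × String)))) (acc : List (PySem.Dict String String)) :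
    tr.foldl (fun acc p =>
      p.2.foldl (fun acc2 q =>
        q.2.foldl (fun acc3 inst =>
          let fin1 := if PySem.Str.pyGet? p.1 0 = some '<' then PySem.Str.slice p.1 (some 1) none else p.1
          let fin2 := if PySem.Str.pyGet? fin1 (-1) = some '>' then PySem.Str.slice fin1 none (some (-1)) else fin1
          let sh1 := if PySem.Str.pyGet? inst.1 0 = some '<' then PySem.Str.slice inst.1 (some 1) none else inst.1
          let sh2 := if PySem.Str.pyGet? sh1 (-1) = some '>' then PySem.Str.slice sh1 none (some (-1)) else sh1
          acc3 ++ [((((PySem.Dict.empty : PySem.Dict String String).insert "shape" sh2).insert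
                      "finished@shape" fin2).insert
                      "validation result" (PySem.Str.replace q.1 "_instances" "")).insert
                      "instance" inst.2])
          acc2) acc) acc
    = acc ++ tr.flatMap (fun p => p.2.flatMap (fun q => q.2.map (pvDictRow p.1 q.1))) := by
  induction tr generalizing acc with
  | nil => simp
  | cons p t ih =>
    rw [List.foldl_cons]
    show List.foldl _ (List.foldl _ acc p.2) t = _
    rw [pvA_mid, ih, List.append_assoc, List.flatMap_cons]

lemma pvB_inner (s v : String) (insts : List (String × String)) (acc : List String) :
    insts.foldl (fun rows3 inst =>
      let cells := (if inst.2 ≠ "" then ["<td>" ++ inst.2 ++ "</td>"] else [])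
      let sh := pvTrimB inst.1
      let cells := cells ++ (if sh ≠ "" then ["<td>" ++ sh ++ "</td>"] else [])
      let cells := cells ++ [if PySem.Str.replace v "_instances" "" ≠ "" then
          (if PySem.Str.replace v "_instances" "" = "valid" then
            "<td style=\"color: green\">" ++ PySem.Str.replace v "_instances" "" ++ "</td>"
           else "<td style=\"color: red\">" ++ PySem.Str.replace v "_instances" "" ++ "</td>")
        else ""]
      let cells := cells ++ (if pvTrimB s ≠ "" then ["<td>" ++ pvTrimB s ++ "</td>"] else [])
      rows3 ++ ["<tr>" ++ PySem.Str.join "" cells ++ "</tr>"]) acc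
    = acc ++ insts.map (pvRowStrB s v) := by
  induction insts generalizing acc with
  | nil => simp
  | cons i t ih =>
    rw [List.foldl_cons, ih, List.append_assoc]
    rfl

lemma pvB_mid (s : String) (vd : List (String × List (String × String))) (acc : List String) :
    vd.foldl (fun rows2 q =>
      let vr := PySem.Str.replace q.1 "_instances" ""
      let vrCell := if vr ≠ "" then
          (if vr = "valid" then "<td style=\"color: green\">" ++ vr ++ "</td>"
           else "<td style=\"color: red\">" ++ vr ++ "</td>")
        else ""
      q.2.foldl (fun rows3 inst =>
        let cells := (if inst.2 ≠ "" then ["<td>" ++ inst.2 ++ "</td>"] else [])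
        let sh := pvTrimB inst.1
        let cells := cells ++ (if sh ≠ "" then ["<td>" ++ sh ++ "</td>"] else [])
        let cells := cells ++ [vrCell]
        let cells := cells ++ (if pvTrimB s ≠ "" then ["<td>" ++ pvTrimB s ++ "</td>"] else [])
        rows3 ++ ["<tr>" ++ PySem.Str.join "" cells ++ "</tr>"]) rows2) acc
    = acc ++ vd.flatMap (fun q => q.2.map (pvRowStrB s q.1)) := by
  induction vd generalizing acc with
  | nil => simp
  | cons q t ih =>
    rw [List.foldl_cons]
    show List.foldl _ (List.foldl _ acc q.2) t = _
    rw [pvB_inner, ih, List.append_assoc, List.flatMap_cons]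

lemma pvB_rows (tr : List (String × List (String × List (String × String)))) (acc : List String) :
    tr.foldl (fun rows p =>
      let fin := pvTrimB p.1
      p.2.foldl (fun rows2 q =>
        let vr := PySem.Str.replace q.1 "_instances" ""
        let vrCell := if vr ≠ "" then
            (if vr = "valid" then "<td style=\"color: green\">" ++ vr ++ "</td>"
             else "<td style=\"color: red\">" ++ vr ++ "</td>")
          else ""
        q.2.foldl (fun rows3 inst =>
          let cells := (if inst.2 ≠ "" then ["<td>" ++ inst.2 ++ "</td>"] else [])
          let sh := pvTrimB inst.1
          let cells := cells ++ (if sh ≠ "" then ["<td>" ++ sh ++ "</td>"] else [])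
          let cells := cells ++ [vrCell]
          let cells := cells ++ (if fin ≠ "" then ["<td>" ++ fin ++ "</td>"] else [])
          rows3 ++ ["<tr>" ++ PySem.Str.join "" cells ++ "</tr>"]) rows2) rows) acc
    = acc ++ tr.flatMap (fun p => p.2.flatMap (fun q => q.2.map (pvRowStrB p.1 q.1))) := by
  induction tr generalizing acc with
  | nil => simp
  | cons p t ih =>
    rw [List.foldl_cons]
    show List.foldl _ (List.foldl _ acc p.2) t = _
    rw [pvB_mid, ih, List.append_assoc, List.flatMap_cons]

lemma pvStepA (res : PySem.Dict String String) (h : String) :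
    (["instance", "shape", "validation result", "finished@shape"].foldl (fun h2 item =>
      let v := (PySem.Dict.get? res item).getD ""
      if v ≠ "" then
        if item = "validation result" then
          if v = "valid" then h2 ++ "<td style=\"color: green\">" ++ v ++ "</td>"
          else h2 ++ "<td style=\"color: red\">" ++ v ++ "</td>"
        else h2 ++ "<td>" ++ v ++ "</td>"
      else h2) (h ++ "<tr>")) ++ "</tr>" = h ++ pvContrib res := by
  simp only [pvContrib, List.foldl, ne_eq, String.reduceEq, reduceIte]
  by_cases h1 : (PySem.Dict.get? res "instance").getD "" = "" <;>
  by_cases h2 : (PySem.Dict.get? res "shape").getD "" = "" <;>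
  by_cases h3 : (PySem.Dict.get? res "validation result").getD "" = "" <;>
  by_cases h4 : (PySem.Dict.get? res "validation result").getD "" = "valid" <;>
  by_cases h5 : (PySem.Dict.get? res "finished@shape").getD "" = "" <;>
  simp [h1, h2, h3, h4, h5, String.append_assoc]

lemma pvA_html (parsed : List (PySem.Dict String String)) (init : String) :
    parsed.foldl (fun h res =>
      (["instance", "shape", "validation result", "finished@shape"].foldl (fun h2 item =>
        let v := (PySem.Dict.get? res item).getD ""
        if v ≠ "" then
          if item = "validation result" then
            if v = "valid" then h2 ++ "<td style=\"color: green\">" ++ v ++ "</td>"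
            else h2 ++ "<td style=\"color: red\">" ++ v ++ "</td>"
          else h2 ++ "<td>" ++ v ++ "</td>"
        else h2) (h ++ "<tr>")) ++ "</tr>") init
    = init ++ PySem.Str.join "" (parsed.map pvContrib) := by
  induction parsed generalizing init with
  | nil => simp [pvJoin_nil]
  | cons r t ih =>
    rw [List.foldl_cons, ih]
    show (((["instance", "shape", "validation result", "finished@shape"].foldl _ (init ++ "<tr>")) ++ "</tr>") : String) ++ _ = _
    rw [pvStepA, List.map_cons, pvJoin_cons, String.append_assoc]

-- ===== VERDICT (by name: the statement is the Claim_ definition above) =====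
theorem travshacl_to_html_table_spec : Claim_equal_travshacl_to_html_table := by
  unfold Claim_equal_travshacl_to_html_table
  intro tr tu _ _
  unfold Spec_travshacl_to_html_table
  unfold travshacl_to_html_table travshacl_to_html_table_alt
  simp only [pvA_parsed, pvB_rows, List.nil_append]
  have hst : ∀ (X : String), List.foldl
      (fun (st : List String × String) item => (st.1 ++ [item], st.2 ++ "<th>" ++ item ++ "</th>"))
      (([] : List String), X) ["instance", "shape", "validation result", "finished@shape"]
      = (["instance", "shape", "validation result", "finished@shape"],
         X ++ "<th>" ++ "instance" ++ "</th>" ++ "<th>" ++ "shape" ++ "</th>" ++ "<th>"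
           ++ "validation result" ++ "</th>" ++ "<th>" ++ "finished@shape" ++ "</th>") :=
    fun X => rfl
  rw [hst]
  rw [pvA_html]
  simp only [List.map_flatMap, List.map_map, Function.comp_def, pvRow_eq, List.length_flatMap,
    List.length_map, List.map_cons, List.map_nil, pvJoin_cons, pvJoin_nil, String.append_assoc,
    String.append_empty]
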